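-- pv_equiv track=rewrite | github.com/kiung22/algorithm-problem-solving | Programmers/level2/level2_52.py | solution
-- ===== SOURCE A (Python) =====
-- from itertools import combinations
--
-- def solution(orders, course):
--     answer = []
--     for n in course:
--         tmp = {}
--         max_value = 0
--         for order in orders:
--             for comb in combinations(sorted(order), n):
--                 comb = ''.join(comb)
--                 tmp[comb] = tmp.get(comb, 0) + 1
--                 if tmp[comb] > max_value:
--                     max_value = tmp[comb]
--         if max_value >= 2:
--             for k, v in tmp.items():
--                 if v == max_value:
--                     answer.append(k)
--
--     answer.sort()
--     return answer
-- ===== SOURCE B (Python) =====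
-- from itertools import combinations
--
-- def _scan(combos, best, winners):
--     # combos is sorted; returns the longest run length and every value whose
--     # run has that length (runs of a sorted list = multiplicities)
--     if not combos:
--         return best, winners
--     x = combos[0]
--     i = 1
--     while i < len(combos) and combos[i] == x:
--         i += 1
--     rest = combos[i:]
--     if i > best:
--         return _scan(rest, i, [x])
--     if i == best:
--         return _scan(rest, best, winners + [x])
--     return _scan(rest, best, winners)
--
-- def solution(orders, course):
--     # sort-then-scan instead of hash counting: for each course length, dump all
--     # combination strings into one list, sort it, and read off the longest runs
--     sorted_orders = [sorted(o) for o in orders]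
--     answer = []
--     for n in course:
--         combos = []
--         for s in sorted_orders:
--             for c in combinations(s, n):
--                 combos.append(''.join(c))
--         combos.sort()
--         best, winners = _scan(combos, 0, [])
--         if best >= 2:
--             answer += winners
--     answer.sort()
--     return answer
-- ===== Notes on version B (the rewrite author's own statement) =====
-- stated objective: alternative
-- what changed: A counts each combination in a hash map with a running max per course length; B uses no dictionary at all: it dumps all combination strings of a length into one list, sorts it, and reads off multiplicities as maximal runs of a recursive run-length scan, appending the values of the longest runs (>= 2).
import Mathlib
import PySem

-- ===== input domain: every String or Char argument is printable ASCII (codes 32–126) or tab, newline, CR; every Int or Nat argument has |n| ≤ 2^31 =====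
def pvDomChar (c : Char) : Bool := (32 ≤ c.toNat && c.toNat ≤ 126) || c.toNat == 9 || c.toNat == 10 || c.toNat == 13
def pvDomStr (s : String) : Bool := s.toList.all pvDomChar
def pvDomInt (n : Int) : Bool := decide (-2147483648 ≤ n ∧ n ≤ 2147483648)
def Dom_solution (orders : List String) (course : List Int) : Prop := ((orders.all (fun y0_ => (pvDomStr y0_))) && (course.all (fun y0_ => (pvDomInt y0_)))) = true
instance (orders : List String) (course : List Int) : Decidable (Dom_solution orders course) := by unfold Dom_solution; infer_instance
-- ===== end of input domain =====

-- B replaces A's hash-map counting (dict + running max per course length) by sort-then-scan: all combination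
-- strings of a length go into one list, which is sorted, and a recursive run-length scan reads off the
-- multiplicities as maximal runs, collecting the values of the longest runs (when that run length is ≥ 2).
-- Return values are proved equal on Pre_ (no negative course entry unless orders is empty).

-- ===== PORT A =====
-- sorted(order): Python sorts the characters of the string; Char comparison is code-point order, exact here
def sortedChars (o : String) : List Char := PySem.List.sorted o.toList (fun c => c) false

-- the body of A's innermost loop: tmp[comb] = tmp.get(comb, 0) + 1; running max (''.join(comb) = String.ofList comb)
def aComb (st : PySem.Dict String Int × Int) (comb : List Char) : PySem.Dict String Int × Int :=
  let key := String.ofList comb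
  let c := st.1.getD key 0 + 1
  (st.1.insert key c, if c > st.2 then c else st.2)

-- A's 'for order in orders' body (n < 0 raises ValueError in Python and is excluded by Pre_)
def aOrder (n : Int) (st : PySem.Dict String Int × Int) (order : String) : PySem.Dict String Int × Int :=
  (PySem.List.combinations (sortedChars order) n.toNat).foldl aComb st

-- A's 'for n in course' body
def aCourse (orders : List String) (answer : List String) (n : Int) : List String :=
  let st := orders.foldl (aOrder n) (PySem.Dict.empty, 0)
  if st.2 ≥ 2 then
    st.1.items.foldl (fun answer kv => if kv.2 == st.2 then answer ++ [kv.1] else answer) answer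
  else answer

def solution (orders : List String) (course : List Int) : List String :=
  PySem.List.sorted (course.foldl (aCourse orders) []) (fun x => x) false

-- ===== PORT B =====
-- Source B's _scan: recursive run-length scan of the sorted combo list; i = 1 + leading repeats of x in the tail
def scanRuns : List String → Int → List String → Int × List String
  | [], best, winners => (best, winners)
  | x :: xs, best, winners =>
      -- Source B's i is 1 + the leading repeats of x in the tail; rest is combos[i:]
      if 1 + ((xs.takeWhile (fun y => y == x)).length : Int) > best then
        scanRuns (xs.dropWhile (fun y => y == x))
          (1 + ((xs.takeWhile (fun y => y == x)).length : Int)) [x]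
      else if 1 + ((xs.takeWhile (fun y => y == x)).length : Int) == best then
        scanRuns (xs.dropWhile (fun y => y == x)) best (winners ++ [x])
      else scanRuns (xs.dropWhile (fun y => y == x)) best winners
termination_by l _ _ => l.length
decreasing_by all_goals (simpa using Nat.lt_succ_of_le (List.length_dropWhile_le _ xs))

-- the two nested append loops building combos for one course entry
def bCombos (sortedOrders : List (List Char)) (n : Int) : List String :=
  sortedOrders.foldl (fun combos s =>
    (PySem.List.combinations s n.toNat).foldl
      (fun combos c => combos ++ [String.ofList c]) combos) []

-- Source B's 'for n in course' body: sort combos, scan runs, keep winners when the longest run is ≥ 2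
def bCourse (sortedOrders : List (List Char)) (answer : List String) (n : Int) : List String :=
  let combos := PySem.List.sorted (bCombos sortedOrders n) (fun x => x) false
  let r := scanRuns combos 0 []
  if r.1 ≥ 2 then answer ++ r.2 else answer

def solution_alt (orders : List String) (course : List Int) : List String :=
  let sortedOrders := orders.map sortedChars
  PySem.List.sorted (course.foldl (bCourse sortedOrders) []) (fun x => x) false

-- ===== PRECONDITION & SPEC =====
-- Pre_ excludes exactly the inputs where Python A raises: when at least one order exists, a negative
-- course entry makes itertools.combinations(..., n) raise ValueError (B raises there identically).
def Pre_solution (orders : List String) (course : List Int) : Prop := orders = [] ∨ ∀ n ∈ course, 0 ≤ n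
instance (orders : List String) (course : List Int) : Decidable (Pre_solution orders course) := by unfold Pre_solution; infer_instance

def pvWitness_solution : List String × List Int := (["AB", "AB", "CA"], [2])

def Spec_solution (orders : List String) (course : List Int) (out : List String) : Prop := out = solution_alt orders course
instance (orders : List String) (course : List Int) (out : List String) : Decidable (Spec_solution orders course out) := by unfold Spec_solution; infer_instance

-- ===== CLAIM (what is proved, stated in full; the proofs are below) =====
def Claim_equal_solution : Prop := ∀ (orders : List String) (course : List Int), Dom_solution orders course → Pre_solution orders course → Spec_solution orders course (solution orders course)

-- ===== LEMMAS AND PROOFS =====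

-- the combination keys (''.join of each combination of the sorted order) one order contributes for length n
def keysOf (n : Int) (o : String) : List String :=
  (PySem.List.combinations (sortedChars o) n.toNat).map (fun comb => String.ofList comb)

-- all keys of length n contributed by all orders, in A's (and B's) traversal order
def ksAll (orders : List String) (n : Int) : List String := orders.flatMap (keysOf n)

-- aComb with the join already performed
def pairStep (st : PySem.Dict String Int × Int) (k : String) : PySem.Dict String Int × Int :=
  let c := st.1.getD k 0 + 1
  (st.1.insert k c, if c > st.2 then c else st.2)

def cnt (ks : List String) (k : String) : Int := (ks.count k : Int)

-- the maximal multiplicity in ks (0 for ks = [])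
def maxC (ks : List String) : Int := ((PySem.Set.ofList ks).map (cnt ks)).foldl max 0

-- the strings contributed to the answer by one course entry n, A's way
def groupOf (orders : List String) (n : Int) : List String :=
  if maxC (ksAll orders n) ≥ 2 then
    ((PySem.Dict.counter (ksAll orders n)).items.filter
      (fun kv => kv.2 == maxC (ksAll orders n))).map (fun kv => kv.1)
  else []

-- the strings contributed by one course entry n, B's way (scan of the sorted key list)
def groupB (orders : List String) (n : Int) : List String :=
  if maxC (ksAll orders n) ≥ 2 then
    (PySem.Set.ofList (PySem.List.sorted (ksAll orders n) (fun x => x) false)).filter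
      (fun y => cnt (PySem.List.sorted (ksAll orders n) (fun x => x) false) y == maxC (ksAll orders n))
  else []

lemma foldl_flat {α β γ : Type} (os : List α) (g : α → List β) (step : γ → β → γ) (init : γ) :
    os.foldl (fun st o => (g o).foldl step st) init = (os.flatMap g).foldl step init := by
  induction os generalizing init with
  | nil => rfl
  | cons o os ih => simp [List.flatMap_cons, List.foldl_append, ih]

lemma fold_max_init (L : List Int) (c : Int) : ∀ a, L.foldl max (max a c) = max (L.foldl max a) c := by
  induction L with
  | nil => intro a; rfl
  | cons x t ih =>
    intro a
    simp only [List.foldl_cons]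
    rw [max_right_comm a c x, ih]

lemma fold_max_update {l : List String} (hnd : l.Nodup) (f g : String → Int) (k : String)
    (hk : k ∈ l) (hoff : ∀ j ∈ l, j ≠ k → g j = f j) (hfk : f k ≤ g k) :
    ∀ a : Int, (l.map g).foldl max a = max ((l.map f).foldl max a) (g k) := by
  induction l with
  | nil => cases hk
  | cons j t ih =>
    intro a
    simp only [List.map_cons, List.foldl_cons]
    rcases List.mem_cons.mp hk with hjk | hkt
    · subst hjk
      have hkt : k ∉ t := (List.nodup_cons.mp hnd).1
      have hmap : t.map g = t.map f :=
        List.map_congr_left (fun j hj => hoff j (List.mem_cons_of_mem _ hj) (fun h => hkt (h ▸ hj)))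
      rw [hmap, fold_max_init, fold_max_init]
      omega
    · have hjk : j ≠ k := fun h => (List.nodup_cons.mp hnd).1 (h ▸ hkt)
      rw [hoff j (by simp) hjk,
        ih (List.nodup_cons.mp hnd).2 hkt (fun j hj h => hoff j (List.mem_cons_of_mem _ hj) h)]

lemma ofList_snoc {α : Type} [BEq α] [LawfulBEq α] (xs : List α) (x : α) :
    PySem.Set.ofList (xs ++ [x]) =
      if x ∈ xs then PySem.Set.ofList xs else PySem.Set.ofList xs ++ [x] := by
  have h1 : PySem.Set.ofList (xs ++ [x]) = PySem.Set.add (PySem.Set.ofList xs) x := by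
    show (xs ++ [x]).foldl PySem.Set.add [] = _
    rw [List.foldl_append]; rfl
  rw [h1]
  by_cases hx : x ∈ xs
  · rw [if_pos hx, PySem.Set.add_of_mem ((PySem.Set.mem_ofList xs x).mpr hx)]
  · rw [if_neg hx]
    exact PySem.Set.add_of_not_mem (fun h => hx ((PySem.Set.mem_ofList xs x).mp h))

lemma maxC_snoc (ks : List String) (k : String) :
    maxC (ks ++ [k]) = max (maxC ks) (cnt ks k + 1) := by
  have hcnt_ne : ∀ j, j ≠ k → cnt (ks ++ [k]) j = cnt ks j := by
    intro j hj
    unfold cnt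
    rw [List.count_append, List.count_singleton]
    have hbe : (k == j) = false := beq_eq_false_iff_ne.mpr (fun h => hj h.symm)
    rw [hbe]
    simp
  have hcnt_k : cnt (ks ++ [k]) k = cnt ks k + 1 := by
    unfold cnt
    rw [List.count_append, List.count_singleton]
    simp
  by_cases hk : k ∈ ks
  · have hof : PySem.Set.ofList (ks ++ [k]) = PySem.Set.ofList ks := by
      rw [ofList_snoc, if_pos hk]
    unfold maxC
    rw [hof, fold_max_update (PySem.Set.nodup_ofList ks) (cnt ks) (cnt (ks ++ [k])) k
      ((PySem.Set.mem_ofList ks k).mpr hk)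
      (fun j _ hj => hcnt_ne j hj) (by rw [hcnt_k]; omega) 0, hcnt_k]
  · have hof : PySem.Set.ofList (ks ++ [k]) = PySem.Set.ofList ks ++ [k] := by
      rw [ofList_snoc, if_neg hk]
    have hzero : cnt ks k = 0 := by
      unfold cnt; simp [List.count_eq_zero_of_not_mem hk]
    unfold maxC
    rw [hof, List.map_append, List.foldl_append, List.map_singleton, hcnt_k]
    have hmap : (PySem.Set.ofList ks).map (cnt (ks ++ [k])) = (PySem.Set.ofList ks).map (cnt ks) :=
      List.map_congr_left (fun j hj => hcnt_ne j
        (fun h => hk (h ▸ (PySem.Set.mem_ofList ks j).mp hj)))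
    rw [hmap]
    simp only [List.foldl_cons, List.foldl_nil]

lemma pair_fold (ks : List String) :
    ks.foldl pairStep (PySem.Dict.empty, 0) = (PySem.Dict.counter ks, maxC ks) := by
  induction ks using List.reverseRecOn with
  | nil => rfl
  | append_singleton ks k ih =>
    rw [List.foldl_append, ih]
    simp only [List.foldl_cons, List.foldl_nil]
    simp only [pairStep]
    refine Prod.ext_iff.mpr ⟨?_, ?_⟩
    · show (PySem.Dict.counter ks).insert k ((PySem.Dict.counter ks).getD k 0 + 1) = _
      have h : PySem.Dict.counter (ks ++ [k])
          = (PySem.Dict.counter ks).insert k ((PySem.Dict.counter ks).getD k 0 + 1) := by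
        rw [PySem.Dict.counter_append_singleton]; rfl
      exact h.symm
    · show (if (PySem.Dict.counter ks).getD k 0 + 1 > maxC ks then (PySem.Dict.counter ks).getD k 0 + 1
        else maxC ks) = maxC (ks ++ [k])
      rw [PySem.Dict.getD_counter, maxC_snoc]
      unfold cnt
      omega

-- A's per-course-entry step appends exactly groupOf
lemma aCourse_eq (orders : List String) (answer : List String) (n : Int) :
    aCourse orders answer n = answer ++ groupOf orders n := by
  simp only [aCourse]
  have h1 : (fun st order => aOrder n st order)
      = fun st order => (keysOf n order).foldl pairStep st := by
    funext st order
    unfold aOrder keysOf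
    rw [List.foldl_map]
    rfl
  have hst : orders.foldl (aOrder n) (PySem.Dict.empty, 0)
      = (PySem.Dict.counter (ksAll orders n), maxC (ksAll orders n)) := by
    show orders.foldl (fun st order => aOrder n st order) (PySem.Dict.empty, 0) = _
    rw [h1, foldl_flat]
    exact pair_fold _
  rw [hst]
  unfold groupOf
  by_cases h : maxC (ksAll orders n) ≥ 2
  · rw [if_pos h, if_pos h]
    exact PySem.List.foldl_append_if (fun kv : String × Int => kv.2 == maxC (ksAll orders n))
      (fun kv : String × Int => kv.1) _ answer
  · rw [if_neg h, if_neg h, List.append_nil]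

-- A's group in filter form
lemma groupA_filter (orders : List String) (n : Int) :
    groupOf orders n =
      if maxC (ksAll orders n) ≥ 2 then
        (PySem.Set.ofList (ksAll orders n)).filter
          (fun y => cnt (ksAll orders n) y == maxC (ksAll orders n))
      else [] := by
  unfold groupOf
  by_cases h : maxC (ksAll orders n) ≥ 2
  · rw [if_pos h, if_pos h, PySem.Dict.items_counter, List.filter_map, List.map_map]
    simp [Function.comp_def, cnt]
  · rw [if_neg h, if_neg h]

lemma maxC_nonneg (ks : List String) : 0 ≤ maxC ks :=
  (PySem.List.le_foldl_max ((PySem.Set.ofList ks).map (cnt ks)) 0).1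

-- maxC only depends on the multiset of ks
lemma maxC_perm {ks ks' : List String} (h : ks.Perm ks') : maxC ks = maxC ks' := by
  have key : ∀ {a b : List String}, a.Perm b → maxC a ≤ maxC b := by
    intro a b hab
    rcases PySem.List.foldl_max_mem ((PySem.Set.ofList a).map (cnt a)) 0 with h0 | hmem
    · have hma : maxC a = 0 := h0
      rw [hma]
      exact maxC_nonneg b
    · obtain ⟨k, hk, hval⟩ := List.mem_map.mp hmem
      have hkb : k ∈ b := hab.mem_iff.mp ((PySem.Set.mem_ofList a k).mp hk)
      have hc : cnt a k = cnt b k := by unfold cnt; rw [hab.count_eq]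
      have hma : maxC a = cnt a k := hval.symm
      have hmem' : cnt b k ∈ (PySem.Set.ofList b).map (cnt b) :=
        List.mem_map.mpr ⟨k, (PySem.Set.mem_ofList b k).mpr hkb, rfl⟩
      rw [hma, hc]
      exact (PySem.List.le_foldl_max _ 0).2 _ hmem'
  exact le_antisymm (key h) (key h.symm)

-- seeded Set.ofList fold: a prefix disjoint from the rest splits off
lemma foldl_add_seed (l : List String) : ∀ (s t : List String), (∀ y ∈ l, y ∉ s) →
    l.foldl PySem.Set.add (s ++ t) = s ++ l.foldl PySem.Set.add t := by
  induction l with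
  | nil => intro s t _; rfl
  | cons y l ih =>
    intro s t hd
    simp only [List.foldl_cons]
    have hys : y ∉ s := hd y (by simp)
    have hadd : PySem.Set.add (s ++ t) y = s ++ PySem.Set.add t y := by
      simp only [PySem.Set.add, PySem.Set.contains]
      by_cases hyt : y ∈ t
      · rw [if_pos (by simp [hyt]), if_pos (by simp [hyt])]
      · rw [if_neg (by simp [hys, hyt]), if_neg (by simp [hyt]), List.append_assoc]
    rw [hadd, ih _ _ (fun z hz => hd z (by simp [hz]))]

lemma foldl_add_const (l : List String) (x : String) (hx : ∀ y ∈ l, y = x) :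
    ∀ s, x ∈ s → l.foldl PySem.Set.add s = s := by
  induction l with
  | nil => intro s _; rfl
  | cons y l ih =>
    intro s hs
    have hy : y = x := hx y (by simp)
    simp only [List.foldl_cons]
    rw [hy, PySem.Set.add_of_mem hs]
    exact ih (fun z hz => hx z (by simp [hz])) s hs

-- Set.ofList of a run-headed list
lemma ofList_run (x : String) (take rest : List String)
    (htake : ∀ y ∈ take, y = x) (hrest : x ∉ rest) :
    PySem.Set.ofList (x :: (take ++ rest)) = x :: PySem.Set.ofList rest := by
  show (x :: (take ++ rest)).foldl PySem.Set.add [] = _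
  simp only [List.foldl_cons, List.foldl_append]
  have h0 : PySem.Set.add [] x = [x] := rfl
  rw [h0, foldl_add_const take x htake [x] (by simp)]
  have := foldl_add_seed rest [x] []
    (fun y hy => by simp; intro h; exact hrest (h ▸ hy))
  simpa using this

-- under Pairwise (≤), x does not survive its own run
lemma not_mem_dropWhile (x : String) : ∀ (xs : List String), (∀ a ∈ xs, x ≤ a) →
    xs.Pairwise (· ≤ ·) → x ∉ xs.dropWhile (fun y => y == x) := by
  intro xs
  induction xs with
  | nil => intro _ _ h; cases h
  | cons y ys ih =>
    intro hle hpw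
    by_cases hyx : (y == x) = true
    · rw [List.dropWhile_cons, if_pos hyx]
      exact ih (fun a ha => hle a (by simp [ha])) hpw.of_cons
    · rw [List.dropWhile_cons, if_neg hyx]
      intro hmem
      have hyx' : y ≠ x := fun h => hyx (by simp [h])
      rcases List.mem_cons.mp hmem with h | h
      · exact hyx' h.symm
      · have h1 : y ≤ x := (List.pairwise_cons.mp hpw).1 x h
        have h2 : x ≤ y := hle y (by simp)
        exact hyx' (le_antisymm h1 h2)

-- the run facts used by the scan spec
lemma run_facts (x : String) (xs : List String) (hpw : (x :: xs).Pairwise (· ≤ ·)) :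
    (∀ y ∈ xs.takeWhile (fun y => y == x), y = x) ∧
    x ∉ xs.dropWhile (fun y => y == x) ∧
    (xs.dropWhile (fun y => y == x)).Pairwise (· ≤ ·) := by
  refine ⟨fun y hy => ?_, ?_, ?_⟩
  · have := List.mem_takeWhile_imp hy
    simpa using this
  · exact not_mem_dropWhile x xs (fun a ha => (List.pairwise_cons.mp hpw).1 a ha) hpw.of_cons
  · exact hpw.of_cons.sublist (List.dropWhile_sublist _)

lemma count_run (x : String) (xs : List String) (hpw : (x :: xs).Pairwise (· ≤ ·)) :
    cnt (x :: xs) x = 1 + ((xs.takeWhile (fun y => y == x)).length : Int) := by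
  obtain ⟨htake, hdrop, _⟩ := run_facts x xs hpw
  have h1 : (xs.takeWhile (fun y => y == x)).count x = (xs.takeWhile (fun y => y == x)).length :=
    List.count_eq_length.mpr (fun b hb => (htake b hb).symm)
  have h2 : (xs.dropWhile (fun y => y == x)).count x = 0 :=
    List.count_eq_zero_of_not_mem hdrop
  have hx : xs.count x = (xs.takeWhile (fun y => y == x)).length := by
    conv_lhs => rw [(List.takeWhile_append_dropWhile (p := fun y => y == x) (l := xs)).symm]
    rw [List.count_append, h1, h2]
    omega
  unfold cnt
  rw [List.count_cons_self, hx]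
  push_cast
  ring

lemma count_rest (x : String) (xs : List String) (y : String) (hy : y ≠ x)
    (hpw : (x :: xs).Pairwise (· ≤ ·)) :
    cnt (x :: xs) y = cnt (xs.dropWhile (fun y => y == x)) y := by
  obtain ⟨htake, _, _⟩ := run_facts x xs hpw
  have h1 : (xs.takeWhile (fun y => y == x)).count y = 0 :=
    List.count_eq_zero_of_not_mem (fun hmem => hy (htake y hmem))
  unfold cnt
  have hcc : List.count y (x :: xs) = List.count y xs := by
    simp [List.count_cons, Ne.symm hy]
  rw [hcc]
  conv_lhs => rw [(List.takeWhile_append_dropWhile (p := fun y => y == x) (l := xs)).symm]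
  rw [List.count_append, h1]
  simp

lemma maxC_run (x : String) (xs : List String) (hpw : (x :: xs).Pairwise (· ≤ ·)) :
    maxC (x :: xs) = max (cnt (x :: xs) x) (maxC (xs.dropWhile (fun y => y == x))) := by
  obtain ⟨htake, hdrop, _⟩ := run_facts x xs hpw
  have hof : PySem.Set.ofList (x :: xs)
      = x :: PySem.Set.ofList (xs.dropWhile (fun y => y == x)) := by
    conv_lhs => rw [show x :: xs
      = x :: (xs.takeWhile (fun y => y == x) ++ xs.dropWhile (fun y => y == x)) by
        rw [List.takeWhile_append_dropWhile]]
    exact ofList_run x _ _ htake hdrop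
  have hmap : (PySem.Set.ofList (xs.dropWhile (fun y => y == x))).map (cnt (x :: xs))
      = (PySem.Set.ofList (xs.dropWhile (fun y => y == x))).map
          (cnt (xs.dropWhile (fun y => y == x))) :=
    List.map_congr_left (fun z hz => count_rest x xs z
      (fun h => hdrop (h ▸ ((PySem.Set.mem_ofList
        (List.dropWhile (fun w => w == x) xs) z).mp hz))) hpw)
  show ((PySem.Set.ofList (x :: xs)).map (cnt (x :: xs))).foldl max 0 = _
  rw [hof, List.map_cons, hmap, List.foldl_cons, fold_max_init]
  show max (maxC (xs.dropWhile (fun y => y == x))) (cnt (x :: xs) x) = _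
  rw [max_comm]

-- the scan spec: on a sorted list, scanRuns returns the maximal multiplicity (vs best) and the winners
lemma scan_spec : ∀ (N : Nat) (l : List String), l.length ≤ N → l.Pairwise (· ≤ ·) →
    ∀ (best : Int) (winners : List String), 0 ≤ best →
    scanRuns l best winners =
      (max best (maxC l),
       (if best = max best (maxC l) then winners else []) ++
         (PySem.Set.ofList l).filter (fun y => cnt l y == max best (maxC l))) := by
  intro N
  induction N with
  | zero =>
    intro l hl _ best winners hb
    have : l = [] := List.length_eq_zero_iff.mp (Nat.le_zero.mp hl)
    subst this
    have h0 : maxC ([] : List String) = 0 := rfl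
    rw [h0, max_eq_left hb, if_pos rfl]
    simp [scanRuns]
  | succ N ih =>
    intro l hl hpw best winners hb
    match l with
    | [] =>
      have h0 : maxC ([] : List String) = 0 := rfl
      rw [h0, max_eq_left hb, if_pos rfl]
      simp [scanRuns]
    | x :: xs =>
      obtain ⟨htake, hdrop, hpwrest⟩ := run_facts x xs hpw
      rw [scanRuns]
      set rest := xs.dropWhile (fun y => y == x) with hrest
      set run : Int := 1 + ((xs.takeWhile (fun y => y == x)).length : Int) with hrun
      have hlen : rest.length ≤ N := by
        rw [hrest]
        have h1 := List.length_dropWhile_le (fun y => y == x) xs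
        simp only [List.length_cons] at hl
        omega
      have hcx : cnt (x :: xs) x = run := count_run x xs hpw
      have hmaxC : maxC (x :: xs) = max run (maxC rest) := by
        rw [maxC_run x xs hpw, hcx]
      have hrun_pos : 0 < run := by
        rw [hrun]; positivity
      have hfl : ∀ M : Int, (PySem.Set.ofList (x :: xs)).filter (fun y => cnt (x :: xs) y == M)
          = (if cnt (x :: xs) x == M then [x] else [])
            ++ (PySem.Set.ofList rest).filter (fun y => cnt rest y == M) := by
        intro M
        have hof : PySem.Set.ofList (x :: xs) = x :: PySem.Set.ofList rest := by
          conv_lhs => rw [show x :: xs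
            = x :: (xs.takeWhile (fun y => y == x) ++ xs.dropWhile (fun y => y == x)) by
              rw [List.takeWhile_append_dropWhile]]
          exact ofList_run x _ _ htake hdrop
        rw [hof, List.filter_cons]
        have hmapf : (PySem.Set.ofList rest).filter (fun y => cnt (x :: xs) y == M)
            = (PySem.Set.ofList rest).filter (fun y => cnt rest y == M) := by
          refine List.filter_congr (fun y hy => ?_)
          have hymem : y ∈ rest := (PySem.Set.mem_ofList _ y).mp hy
          rw [count_rest x xs y (fun h => hdrop (h ▸ hymem)) hpw]
        rw [hmapf]
        split_ifs <;> simp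
      by_cases hgt : run > best
      · rw [if_pos hgt]
        rw [ih rest hlen hpwrest run [x] (le_of_lt hrun_pos)]
        have hle1 : run ≤ max run (maxC rest) := le_max_left _ _
        have hM : max best (maxC (x :: xs)) = max run (maxC rest) := by
          rw [hmaxC]
          exact max_eq_right (le_trans (le_of_lt hgt) hle1)
        have hbne : ¬ best = max best (maxC (x :: xs)) := by
          rw [hM]; omega
        rw [hfl (max best (maxC (x :: xs))), if_neg hbne, hcx, hM]
        by_cases hrm : run = max run (maxC rest)
        · rw [if_pos hrm, if_pos (beq_iff_eq.mpr hrm)]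
          simp
        · rw [if_neg hrm, if_neg (fun hc => hrm (beq_iff_eq.mp hc))]
          simp
      · rw [if_neg hgt]
        by_cases heq : run = best
        · rw [if_pos (beq_iff_eq.mpr heq)]
          rw [ih rest hlen hpwrest best (winners ++ [x]) hb]
          have hM : max best (maxC (x :: xs)) = max best (maxC rest) := by
            rw [hmaxC, ← max_assoc, max_eq_left (by omega : run ≤ best)]
          rw [hfl (max best (maxC (x :: xs))), hM, hcx, heq]
          by_cases hbm : best = max best (maxC rest)
          · rw [if_pos hbm, if_pos hbm, if_pos (beq_iff_eq.mpr hbm)]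
            simp
          · rw [if_neg hbm, if_neg hbm, if_neg (fun hc => hbm (beq_iff_eq.mp hc))]
            simp
        · rw [if_neg (fun hc => heq (beq_iff_eq.mp hc))]
          have hlt : run < best := lt_of_le_of_ne (not_lt.mp hgt) heq
          rw [ih rest hlen hpwrest best winners hb]
          have hM : max best (maxC (x :: xs)) = max best (maxC rest) := by
            rw [hmaxC, ← max_assoc, max_eq_left (le_of_lt hlt)]
          have hbig : best ≤ max best (maxC rest) := le_max_left _ _
          have hrne : ¬ run = max best (maxC rest) := by omega
          rw [hfl (max best (maxC (x :: xs))), hM, hcx,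
            if_neg (fun hc => hrne (beq_iff_eq.mp hc))]
          simp

-- B's combo list is exactly ksAll
lemma bCombos_eq (orders : List String) (n : Int) :
    bCombos (orders.map sortedChars) n = ksAll orders n := by
  unfold bCombos ksAll
  rw [List.foldl_map]
  have h1 : (fun (combos : List String) (o : String) =>
      (PySem.List.combinations (sortedChars o) n.toNat).foldl
        (fun combos c => combos ++ [String.ofList c]) combos)
      = fun combos o => combos ++ keysOf n o := by
    funext combos o
    rw [PySem.List.foldl_append_singleton_eq_map]
    rfl
  rw [h1, PySem.List.foldl_append_eq_flatMap]
  rfl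

-- B's per-course-entry step appends exactly groupB
lemma bCourse_eq (orders : List String) (answer : List String) (n : Int) :
    bCourse (orders.map sortedChars) answer n = answer ++ groupB orders n := by
  have hcombos : bCombos (orders.map sortedChars) n = ksAll orders n := bCombos_eq orders n
  show (if (scanRuns (PySem.List.sorted (bCombos (orders.map sortedChars) n) (fun x => x) false) 0 []).1 ≥ 2
      then answer ++ (scanRuns (PySem.List.sorted (bCombos (orders.map sortedChars) n) (fun x => x) false) 0 []).2
      else answer) = answer ++ groupB orders n
  rw [hcombos]
  set ks := ksAll orders n with hks
  set ks' := PySem.List.sorted ks (fun x => x) false with hks'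
  have hpw : ks'.Pairwise (· ≤ ·) := by
    have := PySem.List.sorted_pairwise ks (fun x => x)
    simpa using this
  have hperm : ks'.Perm ks := PySem.List.sorted_perm ks (fun x => x) false
  have hmax : maxC ks' = maxC ks := maxC_perm hperm
  have hM : max (0 : Int) (maxC ks') = maxC ks := by
    rw [hmax]; exact max_eq_right (maxC_nonneg ks)
  rw [scan_spec ks'.length ks' le_rfl hpw 0 [] le_rfl]
  simp only [hM]
  unfold groupB
  rw [← hks, ← hks']
  by_cases h : maxC ks ≥ 2
  · rw [if_pos h, if_pos h, if_neg (by omega : ¬ (0 : Int) = maxC ks)]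
    simp
  · rw [if_neg h, if_neg h, List.append_nil]

-- groupB is a permutation of groupOf
lemma group_perm (orders : List String) (n : Int) :
    (groupOf orders n).Perm (groupB orders n) := by
  rw [groupA_filter]
  unfold groupB
  set ks := ksAll orders n with hks
  set ks' := PySem.List.sorted ks (fun x => x) false with hks'
  have hperm : ks'.Perm ks := PySem.List.sorted_perm ks (fun x => x) false
  by_cases h : maxC ks ≥ 2
  · rw [if_pos h, if_pos h]
    refine (List.perm_ext_iff_of_nodup
      ((PySem.Set.nodup_ofList ks).filter _)
      ((PySem.Set.nodup_ofList ks').filter _)).mpr ?_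
    intro y
    simp only [List.mem_filter, PySem.Set.mem_ofList]
    constructor
    · rintro ⟨hy, hc⟩
      refine ⟨hperm.mem_iff.mpr hy, ?_⟩
      have : cnt ks' y = cnt ks y := by unfold cnt; rw [hperm.count_eq]
      rw [this]; exact hc
    · rintro ⟨hy, hc⟩
      refine ⟨hperm.mem_iff.mp hy, ?_⟩
      have : cnt ks' y = cnt ks y := by unfold cnt; rw [hperm.count_eq]
      rw [← this]; exact hc
  · rw [if_neg h, if_neg h]

lemma flatMap_perm (course : List Int) (f g : Int → List String)
    (h : ∀ n ∈ course, (f n).Perm (g n)) :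
    (course.flatMap f).Perm (course.flatMap g) := by
  induction course with
  | nil => simp
  | cons n c ih =>
    simp only [List.flatMap_cons]
    exact (h n (by simp)).append (ih (fun m hm => h m (by simp [hm])))

-- ===== VERDICT (by name: the statement is the Claim_ definition above) =====
theorem solution_spec : Claim_equal_solution := by
  intro orders course _hdom _hpre
  show solution orders course = solution_alt orders course
  unfold solution solution_alt
  have hA : course.foldl (aCourse orders) [] = course.flatMap (groupOf orders) := by
    rw [PySem.List.foldl_congr_mem course (aCourse orders)
      (fun ans n => ans ++ groupOf orders n) [] (fun acc n _ => aCourse_eq orders acc n)]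
    exact PySem.List.foldl_append_eq_flatMap (groupOf orders) course []
  have hB : course.foldl (bCourse (orders.map sortedChars)) []
      = course.flatMap (groupB orders) := by
    rw [PySem.List.foldl_congr_mem course (bCourse (orders.map sortedChars))
      (fun ans n => ans ++ groupB orders n) [] (fun acc n _ => bCourse_eq orders acc n)]
    exact PySem.List.foldl_append_eq_flatMap (groupB orders) course []
  show PySem.List.sorted (course.foldl (aCourse orders) []) (fun x => x) false
      = PySem.List.sorted (course.foldl (bCourse (orders.map sortedChars)) []) (fun x => x) false
  rw [hA, hB]
  exact (PySem.List.sorted_id_eq_sorted_id_iff_perm _ _).mpr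
    (flatMap_perm course (groupOf orders) (groupB orders)
      (fun n _ => group_perm orders n))
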